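-- pv_equiv track=rewrite | github.com/chrismoroney/advent-of-code-2024 | Q13/code_part1.py | check_num_tickets
-- ===== SOURCE A (Python) =====
-- def check_num_tickets(machines_and_methods):
--     tickets = []
--
--     for _, combos in machines_and_methods.items():
--         max_tickets = 400
--         for combo in combos:
--             if combo[0] * 3 + combo[1] <= max_tickets:
--                 tickets.append(combo[0] * 3 + combo[1])
--                 max_tickets = combo[0] * 3 + combo[1]
--
--     return tickets
-- ===== SOURCE B (Python) =====
-- def check_num_tickets(machines_and_methods):
--     tickets = []
--     for combos in machines_and_methods.values():
--         costs = [c[0] * 3 + c[1] for c in combos]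
--         # thresholds[i] = min(400, costs[0..i-1]): prefix-minimum table
--         thresholds = [400]
--         for c in costs:
--             thresholds.append(min(thresholds[-1], c))
--         tickets.extend(c for c, th in zip(costs, thresholds) if c <= th)
--     return tickets
-- ===== Notes on version B (the rewrite author's own statement) =====
-- stated objective: alternative
-- what changed: Replaces the inline running-threshold loop with a per-machine decomposition: materialize the cost list, build a prefix-minimum threshold table, then filter costs against the table in a separate pass.
import Mathlib
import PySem

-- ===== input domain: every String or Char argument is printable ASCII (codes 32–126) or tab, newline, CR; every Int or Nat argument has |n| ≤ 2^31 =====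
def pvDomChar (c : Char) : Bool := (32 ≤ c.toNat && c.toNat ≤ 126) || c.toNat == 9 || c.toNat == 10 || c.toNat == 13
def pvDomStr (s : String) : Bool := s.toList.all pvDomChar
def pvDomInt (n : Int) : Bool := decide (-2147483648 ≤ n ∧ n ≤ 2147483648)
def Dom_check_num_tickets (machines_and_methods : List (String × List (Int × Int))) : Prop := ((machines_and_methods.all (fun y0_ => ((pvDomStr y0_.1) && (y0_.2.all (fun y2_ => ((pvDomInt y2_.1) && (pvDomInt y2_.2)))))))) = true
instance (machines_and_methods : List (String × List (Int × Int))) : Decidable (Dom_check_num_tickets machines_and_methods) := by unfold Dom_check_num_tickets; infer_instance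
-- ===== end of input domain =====

-- B replaces A's inline running-threshold loop by a prefix-minimum threshold table built first, then a separate filtering pass (alternative decomposition, same cost).
-- ===== PORT A =====
def check_num_tickets (machines_and_methods : List (String × List (Int × Int))) : List Int :=
  machines_and_methods.foldl
    (fun tickets p =>
      (p.2.foldl
        (fun (st : List Int × Int) combo =>
          if combo.1 * 3 + combo.2 ≤ st.2 then
            (st.1 ++ [combo.1 * 3 + combo.2], combo.1 * 3 + combo.2)
          else st)
        (tickets, 400)).1)
    []

-- ===== PORT B =====
-- prefix-minimum table: pvAccumMin t cs = [t, min t cs0, min t cs0 cs1, …]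
def pvAccumMin : Int → List Int → List Int
  | a, [] => [a]
  | a, c :: cs => a :: pvAccumMin (min a c) cs

def check_num_tickets_alt (machines_and_methods : List (String × List (Int × Int))) : List Int :=
  machines_and_methods.foldl
    (fun tickets p =>
      let costs := p.2.map (fun c => c.1 * 3 + c.2)
      let thresholds := pvAccumMin 400 costs
      tickets ++ (costs.zip thresholds).filterMap
        (fun q => if q.1 ≤ q.2 then some q.1 else none))
    []

-- ===== PRECONDITION & SPEC =====
def Spec_check_num_tickets (machines_and_methods : List (String × List (Int × Int))) (out : List Int) : Prop := out = check_num_tickets_alt machines_and_methods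
instance (machines_and_methods : List (String × List (Int × Int))) (out : List Int) : Decidable (Spec_check_num_tickets machines_and_methods out) := by unfold Spec_check_num_tickets; infer_instance

-- ===== CLAIM (what is proved, stated in full; the proofs are below) =====
def Claim_equal_check_num_tickets : Prop := ∀ (machines_and_methods : List (String × List (Int × Int))), Dom_check_num_tickets machines_and_methods → Spec_check_num_tickets machines_and_methods (check_num_tickets machines_and_methods)

-- ===== LEMMAS AND PROOFS =====

-- ===== VERDICT (by name: the statement is the Claim_ definition above) =====
lemma pv_inner (combos : List (Int × Int)) : ∀ (t : Int) (tickets : List Int),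
    combos.foldl
      (fun (st : List Int × Int) combo =>
        if combo.1 * 3 + combo.2 ≤ st.2 then
          (st.1 ++ [combo.1 * 3 + combo.2], combo.1 * 3 + combo.2)
        else st)
      (tickets, t)
    = (tickets ++ ((combos.map (fun c => c.1 * 3 + c.2)).zip
          (pvAccumMin t (combos.map (fun c => c.1 * 3 + c.2)))).filterMap
          (fun q => if q.1 ≤ q.2 then some q.1 else none),
       (combos.map (fun c => c.1 * 3 + c.2)).foldl min t) := by
  induction combos with
  | nil => intro t tickets; simp
  | cons combo cs ih =>
    intro t tickets
    by_cases h : combo.1 * 3 + combo.2 ≤ t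
    · have hm : min t (combo.1 * 3 + combo.2) = combo.1 * 3 + combo.2 :=
        min_eq_right h
      simp only [List.foldl_cons, List.map_cons, pvAccumMin, if_pos h, hm, List.zip_cons_cons,
        List.filterMap_cons]
      rw [ih]
      simp [List.append_assoc]
    · have hm : min t (combo.1 * 3 + combo.2) = t :=
        min_eq_left (le_of_not_ge h)
      simp only [List.foldl_cons, List.map_cons, pvAccumMin, if_neg h, hm, List.zip_cons_cons,
        List.filterMap_cons]
      rw [ih]

lemma pv_outer (ms : List (String × List (Int × Int))) : ∀ (tickets : List Int),
    ms.foldl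
      (fun tickets p =>
        (p.2.foldl
          (fun (st : List Int × Int) combo =>
            if combo.1 * 3 + combo.2 ≤ st.2 then
              (st.1 ++ [combo.1 * 3 + combo.2], combo.1 * 3 + combo.2)
            else st)
          (tickets, 400)).1)
      tickets
    = ms.foldl
      (fun tickets p =>
        let costs := p.2.map (fun c => c.1 * 3 + c.2)
        let thresholds := pvAccumMin 400 costs
        tickets ++ (costs.zip thresholds).filterMap
          (fun q => if q.1 ≤ q.2 then some q.1 else none))
      tickets := by
  induction ms with
  | nil => intro tickets; rfl
  | cons m ms ih =>
    intro tickets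
    simp only [List.foldl_cons]
    rw [pv_inner]
    exact ih _

-- ===== VERDICT =====
theorem check_num_tickets_spec : Claim_equal_check_num_tickets := by
  intro ms _
  unfold Spec_check_num_tickets check_num_tickets check_num_tickets_alt
  exact pv_outer ms []
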